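-- pv_equiv track=rewrite | github.com/yasufumi-nakata/Pytra | src/backends/cpp/emitter/header_builder.py | _extract_class_names_from_blocks
-- ===== SOURCE A (Python) =====
-- def _extract_class_names_from_blocks(class_blocks: list[str]) -> set[str]:
--     """抽出済み class/struct block からクラス名集合を得る。"""
--     out: set[str] = set()
--     for block in class_blocks:
--         lines = block.splitlines()
--         if len(lines) == 0:
--             continue
--         head = lines[0].strip()
--         if head.startswith("struct "):
--             tail = head[7:]
--         elif head.startswith("class "):
--             tail = head[6:]
--         else:
--             continue
--         name = ""
--         for ch in tail:
--             if (ch >= "A" and ch <= "Z") or (ch >= "a" and ch <= "z") or (ch >= "0" and ch <= "9") or ch == "_":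
--                 name += ch
--             else:
--                 break
--         if name != "":
--             out.add(name)
--     return out
-- ===== SOURCE B (Python) =====
-- _KEYWORDS = ("struct", "class")
--
--
-- def _is_ident_char(ch):
--     return ("A" <= ch <= "Z") or ("a" <= ch <= "z") or ("0" <= ch <= "9") or ch == "_"
--
--
-- def _class_name_of(block):
--     """Name declared on the block's first line, or None."""
--     lines = block.splitlines()
--     if not lines:
--         return None
--     kw, sep, rest = lines[0].strip().partition(" ")
--     if not sep or kw not in _KEYWORDS:
--         return None
--     cut = next((i for i, ch in enumerate(rest) if not _is_ident_char(ch)), len(rest))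
--     return rest[:cut] or None
--
--
-- def _extract_class_names_from_blocks(class_blocks: list[str]) -> set[str]:
--     return {name for name in map(_class_name_of, class_blocks) if name is not None}
-- ===== Notes on version B (the rewrite author's own statement) =====
-- stated objective: idiomatic
-- what changed: B replaces A's two startswith-and-slice branches and char-by-char name accumulation with a per-block Optional helper using str.partition(" ") plus a keyword-membership test, an index search for the first non-identifier character with one slice, and a set comprehension over the mapped blocks instead of an imperative loop with set.add.
import Mathlib
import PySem

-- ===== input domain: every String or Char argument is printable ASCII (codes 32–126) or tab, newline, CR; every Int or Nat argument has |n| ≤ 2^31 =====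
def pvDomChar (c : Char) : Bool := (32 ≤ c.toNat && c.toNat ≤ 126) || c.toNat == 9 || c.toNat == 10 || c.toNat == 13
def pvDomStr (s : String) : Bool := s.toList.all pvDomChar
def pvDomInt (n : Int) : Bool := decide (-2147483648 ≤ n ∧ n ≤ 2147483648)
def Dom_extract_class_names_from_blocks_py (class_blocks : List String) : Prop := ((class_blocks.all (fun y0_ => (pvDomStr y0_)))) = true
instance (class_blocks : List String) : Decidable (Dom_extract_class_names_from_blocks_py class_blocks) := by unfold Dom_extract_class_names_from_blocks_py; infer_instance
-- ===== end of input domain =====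

-- B extracts each block's name with str.partition(" ") + a keyword-membership test + one index search and slice,
-- collected by a set comprehension, instead of A's two prefix branches with char-by-char accumulation (same cost; idiomatic).

-- ===== PORT A =====
-- the identifier-character test both Pythons write as chained comparisons
def pvIsIdentChar (c : Char) : Bool :=
  ('A' ≤ c && c ≤ 'Z') || ('a' ≤ c && c ≤ 'z') || ('0' ≤ c && c ≤ '9') || (c == '_')

-- A's inner `for ch in tail` accumulation loop
def pvNameScanA : List Char → List Char → List Char
  | [], name => name
  | c :: rest, name => if pvIsIdentChar c then pvNameScanA rest (name ++ [c]) else name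

def extract_class_names_from_blocks_py (class_blocks : List String) : List String :=
  class_blocks.foldl (fun out block =>
    let lines := PySem.Str.splitlines block
    if lines.length = 0 then out
    else
      let head := (PySem.Str.strip (lines.headD "")).toList
      let tail? : Option (List Char) :=
        if PySem.Chars.startswith head ("struct ".toList) then some (PySem.List.slice head (some 7) none)
        else if PySem.Chars.startswith head ("class ".toList) then some (PySem.List.slice head (some 6) none)
        else none
      match tail? with
      | none => out
      | some tail =>
        let name := pvNameScanA tail []
        if name = [] then out else PySem.Set.add out (String.mk name)) []

-- ===== PORT B =====
-- hand port of `head.partition(" ")`, exact: `none` ⇔ no space in head (Python's (head, "", "")),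
-- `some (before, after)` ⇔ Python's (before, " ", after) split at the FIRST space
def pvPartitionSpace : List Char → Option (List Char × List Char)
  | [] => none
  | c :: cs =>
    if c == ' ' then some ([], cs)
    else match pvPartitionSpace cs with
         | none => none
         | some p => some (c :: p.1, p.2)

-- B's helper _class_name_of; `next((i for i, ch in enumerate(rest) if not _is_ident_char(ch)), len(rest))` = List.findIdx
def pvClassNameOf (block : String) : Option String :=
  match PySem.Str.splitlines block with
  | [] => none
  | l0 :: _ =>
    match pvPartitionSpace (PySem.Str.strip l0).toList with
    | none => none
    | some (kw, rest) =>
      if kw = "struct".toList ∨ kw = "class".toList then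
        let cut := rest.findIdx (fun c => !(pvIsIdentChar c))
        let name := rest.take cut
        if name = [] then none else some (String.mk name)
      else none

def extract_class_names_from_blocks_py_alt (class_blocks : List String) : List String :=
  PySem.Set.ofList (class_blocks.filterMap pvClassNameOf)

-- ===== PRECONDITION & SPEC =====
def Spec_extract_class_names_from_blocks_py (class_blocks : List String) (out : List String) : Prop := out = extract_class_names_from_blocks_py_alt class_blocks
instance (class_blocks : List String) (out : List String) : Decidable (Spec_extract_class_names_from_blocks_py class_blocks out) := by unfold Spec_extract_class_names_from_blocks_py; infer_instance

-- ===== CLAIM (what is proved, stated in full; the proofs are below) =====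
def Claim_equal_extract_class_names_from_blocks_py : Prop := ∀ (class_blocks : List String), Dom_extract_class_names_from_blocks_py class_blocks → Spec_extract_class_names_from_blocks_py class_blocks (extract_class_names_from_blocks_py class_blocks)

-- ===== LEMMAS AND PROOFS =====

lemma pvPartition_some (k r : List Char) (s : List Char) (h : pvPartitionSpace s = some (k, r)) :
    s = k ++ ' ' :: r := by
  induction s generalizing k r with
  | nil => simp [pvPartitionSpace] at h
  | cons c cs ih =>
    by_cases hc : c = ' '
    · subst hc
      simp [pvPartitionSpace] at h
      simp [← h.1, ← h.2]
    · simp [pvPartitionSpace, hc] at h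
      cases hp : pvPartitionSpace cs with
      | none => simp [hp] at h
      | some p =>
        simp [hp] at h
        obtain ⟨hk, hr⟩ := h
        have := ih p.1 p.2 (by simp [hp])
        subst hr
        simp [← hk, this]

lemma pvPartition_struct (t : List Char) :
    pvPartitionSpace ("struct ".toList ++ t) = some ("struct".toList, t) := by
  rfl

lemma pvPartition_class (t : List Char) :
    pvPartitionSpace ("class ".toList ++ t) = some ("class".toList, t) := by
  rfl

lemma pvNameScan_eq (t acc : List Char) :
    pvNameScanA t acc = acc ++ t.take (t.findIdx (fun c => !(pvIsIdentChar c))) := by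
  induction t generalizing acc with
  | nil => simp [pvNameScanA]
  | cons c cs ih =>
    by_cases hc : pvIsIdentChar c
    · simp [pvNameScanA, hc, List.findIdx_cons, ih]
    · simp [pvNameScanA, hc, List.findIdx_cons]

-- per-block: A's loop body equals dispatch on B's helper
lemma pvSlice7 (l : List Char) : PySem.List.slice l (some 7) none = l.drop 7 := by
  rw [PySem.List.slice_from l (by norm_num)]; rfl

lemma pvSlice6 (l : List Char) : PySem.List.slice l (some 6) none = l.drop 6 := by
  rw [PySem.List.slice_from l (by norm_num)]; rfl

-- per-block: A's loop body equals dispatch on B's helper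
lemma pv_step_eq (out : List String) (block : String) :
    (let lines := PySem.Str.splitlines block
     if lines.length = 0 then out
     else
       let head := (PySem.Str.strip (lines.headD "")).toList
       let tail? : Option (List Char) :=
         if PySem.Chars.startswith head ("struct ".toList) then some (PySem.List.slice head (some 7) none)
         else if PySem.Chars.startswith head ("class ".toList) then some (PySem.List.slice head (some 6) none)
         else none
       match tail? with
       | none => out
       | some tail =>
         let name := pvNameScanA tail []
         if name = [] then out else PySem.Set.add out (String.mk name)) =
    (match pvClassNameOf block with
     | none => out
     | some n => PySem.Set.add out n) := by
  cases hls : PySem.Str.splitlines block with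
  | nil => simp [pvClassNameOf, hls]
  | cons l0 rest =>
    simp only [pvClassNameOf, hls, List.headD_cons, List.length_cons]
    rw [if_neg (by simp)]
    generalize (PySem.Str.strip l0).toList = head
    by_cases hs : PySem.Chars.startswith head ("struct ".toList) = true
    · obtain ⟨t, ht⟩ := (PySem.Chars.startswith_iff _ _).mp hs
      subst ht
      rw [if_pos hs, pvPartition_struct, pvSlice7]
      have hd : ("struct ".toList ++ t).drop 7 = t := by rfl
      rw [hd]
      simp only [pvNameScan_eq, List.nil_append]
      simp only [true_or, if_true]
      split_ifs with h1 <;> rfl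
    · by_cases hc : PySem.Chars.startswith head ("class ".toList) = true
      · obtain ⟨t, ht⟩ := (PySem.Chars.startswith_iff _ _).mp hc
        subst ht
        rw [if_neg hs, if_pos hc, pvPartition_class, pvSlice6]
        have hd : ("class ".toList ++ t).drop 6 = t := by rfl
        rw [hd]
        simp only [pvNameScan_eq, List.nil_append]
        simp only [or_true, if_true]
        split_ifs with h1 <;> rfl
      · rw [if_neg hs, if_neg hc]
        cases hp : pvPartitionSpace head with
        | none => rfl
        | some p =>
          obtain ⟨kw, r⟩ := p
          have hh := pvPartition_some kw r head hp
          have h1 : kw ≠ "struct".toList := fun h => hs ((PySem.Chars.startswith_iff _ _).mpr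
              ⟨r, by rw [hh, h]; rfl⟩)
          have h2 : kw ≠ "class".toList := fun h => hc ((PySem.Chars.startswith_iff _ _).mpr
              ⟨r, by rw [hh, h]; rfl⟩)
          have h3 : ¬(kw = ['s','t','r','u','c','t'] ∨ kw = ['c','l','a','s','s']) := by
            rintro (h | h)
            · exact h1 (h.trans rfl)
            · exact h2 (h.trans rfl)
          simp [h3]

lemma pv_fold_eq (l : List String) (out : List String) :
    l.foldl (fun out block =>
      let lines := PySem.Str.splitlines block
      if lines.length = 0 then out
      else
        let head := (PySem.Str.strip (lines.headD "")).toList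
        let tail? : Option (List Char) :=
          if PySem.Chars.startswith head ("struct ".toList) then some (PySem.List.slice head (some 7) none)
          else if PySem.Chars.startswith head ("class ".toList) then some (PySem.List.slice head (some 6) none)
          else none
        match tail? with
        | none => out
        | some tail =>
          let name := pvNameScanA tail []
          if name = [] then out else PySem.Set.add out (String.mk name)) out =
    (l.filterMap pvClassNameOf).foldl PySem.Set.add out := by
  induction l generalizing out with
  | nil => rfl
  | cons b bs ih =>
    rw [List.foldl_cons, pv_step_eq out b]
    cases hb : pvClassNameOf b with
    | none => rw [List.filterMap_cons_none hb]; exact ih out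
    | some n => rw [List.filterMap_cons_some hb, List.foldl_cons]; exact ih _

-- ===== VERDICT (by name: the statement is the Claim_ definition above) =====
theorem extract_class_names_from_blocks_py_spec : Claim_equal_extract_class_names_from_blocks_py := by
  intro class_blocks _
  unfold Spec_extract_class_names_from_blocks_py extract_class_names_from_blocks_py extract_class_names_from_blocks_py_alt
  rw [PySem.Set.ofList_eq_foldl, pv_fold_eq]
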